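-- pv_equiv track=rewrite | github.com/GiuseppeVitolo17/PokemonDAgba | scripts/fix_aa_ae_oe.py | replace_inside_strings
-- ===== SOURCE A (Python) =====
-- SUBST = [
--     ("AA", "Â"),
--     ("aa", "â"),
--     ("AE", "Ä"),
--     ("ae", "ä"),
--     ("OE", "Ö"),
--     ("oe", "ö"),
-- ]
--
-- def replace_inside_strings(content: str) -> str:
--     """Replace aa/ae/oe only inside double-quoted string literals."""
--     result = []
--     i = 0
--     n = len(content)
--     in_string = False
--     escape_next = False
--     # For asm: .string "..."  For C: _("...") or "..."
--     while i < n: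
--         c = content[i]
--         if escape_next:
--             result.append(c)
--             escape_next = False
--             i += 1
--             continue
--         if c == "\\" and in_string:
--             result.append(c)
--             escape_next = True
--             i += 1
--             continue
--         if c == '"' and not escape_next:
--             in_string = not in_string
--             result.append(c)
--             i += 1
--             continue
--         if in_string:
--             # Check for 2-char sequences to replace
--             replaced = False
--             for old, new in SUBST:
--                 if content[i : i + len(old)] == old:
--                     result.append(new)
--                     i += len(old)
--                     replaced = True
--                     break
--             if not replaced:
--                 result.append(c)
--                 i += 1
--         else:
--             result.append(c)
--             i += 1
--     return "".join(result)
-- ===== SOURCE B (Python) =====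
-- SUBST = [
--     ("AA", "Â"),
--     ("aa", "â"),
--     ("AE", "Ä"),
--     ("ae", "ä"),
--     ("OE", "Ö"),
--     ("oe", "ö"),
-- ]
--
-- SUBST_MAP = dict(SUBST)
--
-- def replace_inside_strings(content: str) -> str:
--     """Replace aa/ae/oe only inside double-quoted string literals."""
--     n = len(content)
--     out = []
--     i = 0
--     while True:
--         j = content.find('"', i)
--         if j < 0:
--             out.append(content[i:])
--             return "".join(out)
--         out.append(content[i:j + 1])
--         i = j + 1
--         # inside a string literal: escape pairs pass verbatim, tokens map via SUBST_MAP
--         while i < n: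
--             c = content[i]
--             if c == "\\":
--                 out.append(content[i:i + 2])
--                 i += 2
--             elif c == '"':
--                 out.append(c)
--                 i += 1
--                 break
--             else:
--                 rep = SUBST_MAP.get(content[i:i + 2])
--                 if rep is None:
--                     out.append(c)
--                     i += 1
--                 else:
--                     out.append(rep)
--                     i += 2
-- ===== Notes on version B (the rewrite author's own statement) =====
-- stated objective: faster
-- what changed: A's single char-by-char state machine with in_string/escape_next boolean flags is replaced by find-driven nested loops: str.find skips straight to the next quote, the literal body is walked with escape pairs consumed atomically (no escape flag), and the ordered per-position SUBST scan becomes one dict lookup of the 2-char slice.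
import Mathlib
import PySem

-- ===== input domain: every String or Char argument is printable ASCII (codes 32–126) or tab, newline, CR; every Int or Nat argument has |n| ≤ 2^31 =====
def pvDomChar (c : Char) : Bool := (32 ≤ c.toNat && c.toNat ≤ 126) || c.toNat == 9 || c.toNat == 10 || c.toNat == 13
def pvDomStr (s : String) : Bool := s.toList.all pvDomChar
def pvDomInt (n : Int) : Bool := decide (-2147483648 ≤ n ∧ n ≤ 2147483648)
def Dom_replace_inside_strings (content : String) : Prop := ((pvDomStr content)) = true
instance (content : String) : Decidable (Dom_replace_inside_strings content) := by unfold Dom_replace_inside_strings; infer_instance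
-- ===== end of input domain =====

-- B restructures A's boolean-flag state machine into find-driven nested loops: skip to the next quote,
-- then walk the literal consuming escape pairs atomically and mapping 2-char tokens through a dict (objective: faster, in a timing run's measurement).

-- ===== PORT A =====
-- SUBST, with olds as char lists and news as single chars
def pvSubstA : List (List Char × Char) :=
  [(['A','A'], 'Â'), (['a','a'], 'â'), (['A','E'], 'Ä'), (['a','e'], 'ä'), (['O','E'], 'Ö'), (['o','e'], 'ö')]

-- A's inner `for old, new in SUBST: if content[i:i+len(old)] == old: …` — first matching entry, rest of input after it
def pvTrySub : List (List Char × Char) → List Char → Option (Char × List Char)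
  | [], _ => none
  | (old, new) :: tbl, cs => if old.isPrefixOf cs then some (new, cs.drop old.length) else pvTrySub tbl cs

-- termination helper for pvGoA (cited by its decreasing_by)
theorem pvTrySub_shrink (tbl : List (List Char × Char)) (cs : List Char) (nc : Char) (r : List Char)
    (hne : ∀ p ∈ tbl, p.1 ≠ []) (h : pvTrySub tbl cs = some (nc, r)) : r.length < cs.length := by
  induction tbl with
  | nil => simp [pvTrySub] at h
  | cons p tbl ih =>
    obtain ⟨old, new⟩ := p
    rw [pvTrySub] at h
    by_cases hp : old.isPrefixOf cs
    · simp [hp] at h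
      have hpre : old <+: cs := List.isPrefixOf_iff_prefix.mp hp
      have h1 : old.length ≤ cs.length := hpre.length_le
      have h2 : old ≠ [] := hne (old, new) (by simp)
      have h3 : 0 < old.length := List.length_pos_iff.mpr h2
      have : r = cs.drop old.length := h.2.symm
      subst this
      simp [List.length_drop]
      omega
    · simp [hp] at h
      exact ih (fun p hp => hne p (by simp [hp])) h

-- A's while loop: state = remaining input, in_string, escape_next; result appended front-to-back
def pvGoA : List Char → Bool → Bool → List Char
  | [], _, _ => []
  | c :: rest, inStr, esc =>
    if esc then c :: pvGoA rest inStr false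
    else if c = '\\' ∧ inStr = true then c :: pvGoA rest inStr true
    else if c = '"' then c :: pvGoA rest (!inStr) false
    else if inStr then
      match h : pvTrySub pvSubstA (c :: rest) with
      | some (nc, rest') => nc :: pvGoA rest' inStr false
      | none => c :: pvGoA rest inStr false
    else c :: pvGoA rest inStr false
  termination_by cs _ _ => cs.length
  decreasing_by
  · simp
  · simp
  · simp
  · exact pvTrySub_shrink pvSubstA (c :: rest) nc rest' (by decide) h
  · simp
  · simp

def replace_inside_strings (content : String) : String :=
  String.ofList (pvGoA content.toList false false)

-- ===== PORT B =====
-- SUBST_MAP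
def pvSubstMap : PySem.Dict String String :=
  PySem.Dict.ofList [("AA", "Â"), ("aa", "â"), ("AE", "Ä"), ("ae", "ä"), ("OE", "Ö"), ("oe", "ö")]

mutual
-- outer loop on the suffix from i: j = content.find('"', i) (List.idxOf plays str.find: absent gives
-- length instead of -1, so the branch tests j < length instead of j >= 0), emit content[i:j+1], go inside
def pvOutB (cs : List Char) : List Char :=
  let j := List.idxOf '"' cs
  if j < cs.length then cs.take (j + 1) ++ pvInB (cs.drop (j + 1)) else cs
  termination_by cs.length
  decreasing_by simp; omega
-- inner loop: escape pair verbatim, closing quote back to outer, else SUBST_MAP.get(content[i:i+2])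
def pvInB : List Char → List Char
  | [] => []
  | c :: r =>
    if c = '\\' then
      match r with              -- content[i:i+2] then i += 2
      | [] => [c]
      | d :: r' => c :: d :: pvInB r'
    else if c = '"' then c :: pvOutB r
    else
      match PySem.Dict.get? pvSubstMap (String.ofList ((c :: r).take 2)) with
      | some rep => rep.toList ++ pvInB (r.drop 1)
      | none => c :: pvInB r
  termination_by cs => cs.length
  decreasing_by
  · simp
  · simp
  · cases r with
    | nil => simp
    | cons d r' => simp
  · simp
end

def replace_inside_strings_alt (content : String) : String :=
  String.ofList (pvOutB content.toList)

-- ===== PRECONDITION & SPEC =====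
def Spec_replace_inside_strings (content : String) (out : String) : Prop := out = replace_inside_strings_alt content
instance (content : String) (out : String) : Decidable (Spec_replace_inside_strings content out) := by unfold Spec_replace_inside_strings; infer_instance

-- ===== CLAIM (what is proved, stated in full; the proofs are below) =====
def Claim_equal_replace_inside_strings : Prop := ∀ (content : String), Dom_replace_inside_strings content → Spec_replace_inside_strings content (replace_inside_strings content)

-- ===== LEMMAS AND PROOFS =====

theorem pvOutB_nil : pvOutB [] = [] := by
  rw [pvOutB]; simp

theorem pvOutB_cons_ne (c : Char) (r : List Char) (h : c ≠ '"') :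
    pvOutB (c :: r) = c :: pvOutB r := by
  rw [pvOutB, pvOutB]
  have hx : List.idxOf '"' (c :: r) = List.idxOf '"' r + 1 := by
    simp [h]
  simp only [hx]
  by_cases hj : List.idxOf '"' r < r.length
  · simp [hj, List.take_succ_cons, List.drop_succ_cons]
  · simp [hj]

theorem pvOutB_cons_quote (r : List Char) : pvOutB ('"' :: r) = '"' :: pvInB r := by
  rw [pvOutB]
  simp

-- bridge: B's dict lookup on content[i:i+2] is A's ordered prefix scan
theorem pvMk_eq : pvSubstMap = PySem.Dict.mk [(String.ofList ['A','A'], "Â"), (String.ofList ['a','a'], "â"),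
    (String.ofList ['A','E'], "Ä"), (String.ofList ['a','e'], "ä"), (String.ofList ['O','E'], "Ö"), (String.ofList ['o','e'], "ö")] := by decide

theorem pvLit_eq_iff (s : String) (l : List Char) : (s = String.ofList l) ↔ (s.toList = l) := by
  constructor
  · intro h; rw [h]; simp
  · intro h; rw [← h]; simp

theorem pvLookup_bridge_nil (c : Char) :
    PySem.Dict.get? pvSubstMap (String.ofList [c]) =
      (pvTrySub pvSubstA [c]).map (fun p => String.ofList [p.1]) := by
  simp [pvMk_eq, PySem.Dict.get?, beq_iff_eq, pvLit_eq_iff, pvSubstA, pvTrySub, List.isPrefixOf]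

theorem pvLookup_bridge (c d : Char) (r : List Char) :
    PySem.Dict.get? pvSubstMap (String.ofList [c, d]) =
      (pvTrySub pvSubstA (c :: d :: r)).map (fun p => String.ofList [p.1]) := by
  by_cases h1 : 'A' = c ∧ 'A' = d
  · obtain ⟨rfl, rfl⟩ := h1; simp [pvSubstA, pvTrySub, List.isPrefixOf]; decide
  · by_cases h2 : 'a' = c ∧ 'a' = d
    · obtain ⟨rfl, rfl⟩ := h2; simp [pvSubstA, pvTrySub, List.isPrefixOf]; decide
    · by_cases h3 : 'A' = c ∧ 'E' = d
      · obtain ⟨rfl, rfl⟩ := h3; simp [pvSubstA, pvTrySub, List.isPrefixOf]; decide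
      · by_cases h4 : 'a' = c ∧ 'e' = d
        · obtain ⟨rfl, rfl⟩ := h4; simp [pvSubstA, pvTrySub, List.isPrefixOf]; decide
        · by_cases h5 : 'O' = c ∧ 'E' = d
          · obtain ⟨rfl, rfl⟩ := h5; simp [pvSubstA, pvTrySub, List.isPrefixOf]; decide
          · by_cases h6 : 'o' = c ∧ 'e' = d
            · obtain ⟨rfl, rfl⟩ := h6; simp [pvSubstA, pvTrySub, List.isPrefixOf]; decide
            · simp [pvMk_eq, beq_iff_eq, pvLit_eq_iff,
                    pvSubstA, pvTrySub, List.isPrefixOf, h1, h2, h3, h4, h5, h6, PySem.Dict.get?]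

theorem pvTrySub_rest (c : Char) (r : List Char) (nc : Char) (rest' : List Char)
    (h : pvTrySub pvSubstA (c :: r) = some (nc, rest')) : rest' = r.drop 1 := by
  simp [pvSubstA, pvTrySub] at h
  split_ifs at h <;> simp_all

theorem pvMain : ∀ (n : Nat) (cs : List Char), cs.length ≤ n →
    (pvGoA cs false false = pvOutB cs) ∧ (pvGoA cs true false = pvInB cs) := by
  intro n
  induction n with
  | zero =>
    intro cs hle
    have : cs = [] := List.eq_nil_of_length_eq_zero (Nat.le_zero.mp hle)
    subst this
    constructor
    · rw [pvGoA, pvOutB_nil]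
    · rw [pvGoA, pvInB]
  | succ n ih =>
    intro cs hle
    cases cs with
    | nil =>
      constructor
      · rw [pvGoA, pvOutB_nil]
      · rw [pvGoA, pvInB]
    | cons c r =>
      have hr : r.length ≤ n := by simp at hle; omega
      constructor
      · -- outside a string, esc = false
        by_cases hq : c = '"'
        · subst hq
          rw [pvGoA, pvOutB_cons_quote]
          simp [(ih r hr).2]
        · rw [pvGoA, pvOutB_cons_ne c r hq]
          simp [hq, (ih r hr).1]
      · -- inside a string, esc = false
        by_cases hb : c = '\\'
        · subst hb
          cases r with
          | nil =>
            rw [pvGoA, pvInB.eq_def]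
            simp
            rw [pvGoA]
          | cons d r' =>
            have hr' : r'.length ≤ n := by simp at hle; omega
            rw [pvGoA, pvInB.eq_def]
            simp
            rw [pvGoA]
            simp [(ih r' hr').2]
        · by_cases hq : c = '"'
          · subst hq
            rw [pvGoA, pvInB.eq_def]
            simp [(ih r hr).1]
          · rw [pvGoA, pvInB.eq_def]
            simp [hb, hq]
            cases r with
            | nil =>
              have ht : pvTrySub pvSubstA [c] = none := by
                simp [pvTrySub, pvSubstA, List.isPrefixOf]
              rw [ht]
              have hB := pvLookup_bridge_nil c
              rw [ht] at hB
              simp at hB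
              simp [hB]
              rw [pvGoA, pvInB]
            | cons d r' =>
              have hr' : r'.length ≤ n := by simp at hle; omega
              have hB := pvLookup_bridge c d r'
              rcases h : pvTrySub pvSubstA (c :: d :: r') with _ | ⟨nc, rest'⟩
              · rw [h] at hB
                simp at hB
                simp [hB]
                exact (ih (d :: r') hr).2
              · have hrest : rest' = r' := by simpa using pvTrySub_rest c (d :: r') nc rest' h
                rw [h] at hB
                simp at hB
                simp [hB, hrest]
                exact (ih r' hr').2

-- ===== VERDICT (by name: the statement is the Claim_ definition above) =====
theorem replace_inside_strings_spec : Claim_equal_replace_inside_strings := by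
  intro content _
  unfold Spec_replace_inside_strings replace_inside_strings replace_inside_strings_alt
  exact congrArg String.ofList (pvMain content.toList.length content.toList le_rfl).1
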